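-- pv_equiv track=rewrite | github.com/STP-Team/stpsher | tgbot/services/files_processing/formatters/schedule.py | _format_consecutive_days
-- ===== SOURCE A (Python) =====
-- from typing import Dict, List, Optional, Tuple
--
-- def _format_consecutive_days(days: List[str], current_day: int = None) -> str:
--     """Format consecutive days"""
--     if not days:
--         return ""
--
--     try:
--         sorted_days = sorted([int(d) for d in days])
--     except ValueError:
--         return ", ".join(days)
--
--     ranges = []
--     start = sorted_days[0]
--     end = start
--
--     for day in sorted_days[1:]:
--         if day == end + 1:
--             end = day
--         else:
--             # Check if current day is in this range
--             if current_day and start <= current_day <= end: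
--                 if start == end:
--                     ranges.append(f"<u><b>{start}</b></u>")
--                 else:
--                     ranges.append(
--                         f"{start}-{end}"
--                         if current_day not in (start, end)
--                         else f"<u><b>{start}</b></u>-{end}"
--                         if current_day == start
--                         else f"{start}-<u><b>{end}</b></u>"
--                     )
--             else:
--                 ranges.append(str(start) if start == end else f"{start}-{end}")
--             start = end = day
--
--     # Handle the last range
--     if current_day and start <= current_day <= end:
--         if start == end:
--             ranges.append(f"<u><b>{start}</b></u>")
--         else:
--             ranges.append(
--                 f"{start}-{end}"
--                 if current_day not in (start, end)
--                 else f"<u><b>{start}</b></u>-{end}"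
--                 if current_day == start
--                 else f"{start}-<u><b>{end}</b></u>"
--             )
--     else:
--         ranges.append(str(start) if start == end else f"{start}-{end}")
--     return ", ".join(ranges)
-- ===== SOURCE B (Python) =====
-- def _format_consecutive_days(days, current_day=None):
--     """Format consecutive days"""
--     if not days:
--         return ""
--     try:
--         s = sorted(int(d) for d in days)
--     except ValueError:
--         return ", ".join(days)
--     # Boundary detection: a run boundary sits between adjacent sorted values
--     # a, b with b != a + 1.  Run starts = first value + every 'b' after a
--     # boundary; run ends = every 'a' before a boundary + last value.
--     pairs = list(zip(s, s[1:]))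
--     starts = [s[0]] + [b for a, b in pairs if b != a + 1]
--     ends = [a for a, b in pairs if b != a + 1] + [s[-1]]
--     return ", ".join(_piece(st, en, current_day) for st, en in zip(starts, ends))
--
--
-- def _piece(start, end, cd):
--     if start == end:
--         if cd and cd == start:
--             return f"<u><b>{start}</b></u>"
--         return str(start)
--     if cd and cd == start:
--         return f"<u><b>{start}</b></u>-{end}"
--     if cd and cd == end:
--         return f"{start}-<u><b>{end}</b></u>"
--     return f"{start}-{end}"
-- ===== Notes on version B (the rewrite author's own statement) =====
-- stated objective: alternative
-- what changed: A scans the sorted days with a mutable (ranges, start, end) accumulator, formatting each run inline with a duplicated tail block; B has no grouping loop at all: it detects run boundaries by zipping the sorted list with its own tail, builds the run-start and run-end lists as two filtered comprehensions, zips them into runs and maps a single format helper over them.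
import Mathlib
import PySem

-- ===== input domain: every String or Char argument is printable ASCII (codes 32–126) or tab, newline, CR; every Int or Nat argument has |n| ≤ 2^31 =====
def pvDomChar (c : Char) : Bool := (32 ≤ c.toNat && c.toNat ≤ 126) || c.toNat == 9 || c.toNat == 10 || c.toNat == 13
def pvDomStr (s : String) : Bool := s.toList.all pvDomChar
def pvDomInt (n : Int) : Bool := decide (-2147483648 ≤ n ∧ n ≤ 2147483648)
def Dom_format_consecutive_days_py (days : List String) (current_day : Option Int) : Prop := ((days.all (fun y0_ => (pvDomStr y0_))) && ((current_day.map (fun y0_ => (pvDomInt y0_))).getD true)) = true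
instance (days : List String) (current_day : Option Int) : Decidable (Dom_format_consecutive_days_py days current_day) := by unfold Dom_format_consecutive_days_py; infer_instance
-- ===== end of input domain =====

-- B replaces A's stateful run-grouping scan by boundary detection: zip the sorted list with
-- its tail, filter the non-consecutive adjacent pairs, read run starts and run ends off the
-- two projections, zip them into runs and map one format helper; same return value, no speed claim.

-- ===== PORT A =====
-- sorted([int(d) for d in days]) raising ValueError ⇒ none (the comprehension stops at the first bad string)
def pvParseInts (days : List String) : Option (List Int) :=
  days.mapM PySem.Int.ofStr?

def format_consecutive_days_py (days : List String) (current_day : Option Int) : String :=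
  if days = [] then ""
  else
    match pvParseInts days with
    | none => PySem.Str.join ", " days
    | some ints =>
      match PySem.List.sorted ints (fun x => x) false with
      | [] => ""   -- unreachable: days ≠ [] forces ints ≠ []
      | s0 :: tl =>
        -- for day in sorted_days[1:]: state = (ranges, start, end)
        let st := tl.foldl (fun (acc : List String × Int × Int) day =>
          if day = acc.2.2 + 1 then (acc.1, acc.2.1, day)
          else
            (acc.1 ++
              [if (match current_day with
                   | some c => decide (c ≠ 0) && decide (acc.2.1 ≤ c) && decide (c ≤ acc.2.2)
                   | none => false) then
                 if acc.2.1 = acc.2.2 then "<u><b>" ++ PySem.Int.toStr acc.2.1 ++ "</b></u>"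
                 else if current_day ≠ some acc.2.1 ∧ current_day ≠ some acc.2.2 then
                   PySem.Int.toStr acc.2.1 ++ "-" ++ PySem.Int.toStr acc.2.2
                 else if current_day = some acc.2.1 then
                   "<u><b>" ++ PySem.Int.toStr acc.2.1 ++ "</b></u>-" ++ PySem.Int.toStr acc.2.2
                 else PySem.Int.toStr acc.2.1 ++ "-<u><b>" ++ PySem.Int.toStr acc.2.2 ++ "</b></u>"
               else
                 if acc.2.1 = acc.2.2 then PySem.Int.toStr acc.2.1
                 else PySem.Int.toStr acc.2.1 ++ "-" ++ PySem.Int.toStr acc.2.2],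
             day, day)) ([], s0, s0)
        -- handle the last range (textually the same expression in the Python)
        PySem.Str.join ", " (st.1 ++
          [if (match current_day with
               | some c => decide (c ≠ 0) && decide (st.2.1 ≤ c) && decide (c ≤ st.2.2)
               | none => false) then
             if st.2.1 = st.2.2 then "<u><b>" ++ PySem.Int.toStr st.2.1 ++ "</b></u>"
             else if current_day ≠ some st.2.1 ∧ current_day ≠ some st.2.2 then
               PySem.Int.toStr st.2.1 ++ "-" ++ PySem.Int.toStr st.2.2
             else if current_day = some st.2.1 then
               "<u><b>" ++ PySem.Int.toStr st.2.1 ++ "</b></u>-" ++ PySem.Int.toStr st.2.2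
             else PySem.Int.toStr st.2.1 ++ "-<u><b>" ++ PySem.Int.toStr st.2.2 ++ "</b></u>"
           else
             if st.2.1 = st.2.2 then PySem.Int.toStr st.2.1
             else PySem.Int.toStr st.2.1 ++ "-" ++ PySem.Int.toStr st.2.2])

-- ===== PORT B =====
-- _piece
def pvPiece (s e : Int) (cd : Option Int) : String :=
  if s = e then
    if (match cd with | some c => decide (c ≠ 0) && decide (c = s) | none => false) then
      "<u><b>" ++ PySem.Int.toStr s ++ "</b></u>"
    else PySem.Int.toStr s
  else if (match cd with | some c => decide (c ≠ 0) && decide (c = s) | none => false) then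
    "<u><b>" ++ PySem.Int.toStr s ++ "</b></u>-" ++ PySem.Int.toStr e
  else if (match cd with | some c => decide (c ≠ 0) && decide (c = e) | none => false) then
    PySem.Int.toStr s ++ "-<u><b>" ++ PySem.Int.toStr e ++ "</b></u>"
  else PySem.Int.toStr s ++ "-" ++ PySem.Int.toStr e

-- the comprehension condition 'b != a + 1' on an adjacent pair
def pvCut (p : Int × Int) : Bool := decide (p.2 ≠ p.1 + 1)

def format_consecutive_days_py_alt (days : List String) (current_day : Option Int) : String :=
  if days = [] then ""
  else
    match pvParseInts days with
    | none => PySem.Str.join ", " days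
    | some ints =>
      match PySem.List.sorted ints (fun x => x) false with
      | [] => ""   -- unreachable: days ≠ [] forces ints ≠ []
      | s0 :: tl =>
        let s := s0 :: tl
        -- pairs = zip(s, s[1:]);  s[1:] via PySem slice (exact)
        let pairs := s.zip (PySem.List.slice s (some 1) none)
        let cut := pairs.filter pvCut
        -- starts = [s[0]] + [b for a,b in pairs if b != a+1]  (s[0] = s0)
        let starts := s0 :: cut.map Prod.snd
        -- ends = [a for a,b in pairs if b != a+1] + [s[-1]]   (s[-1]: in range, s ≠ [])
        let ends := cut.map Prod.fst ++ [PySem.List.pyGetD s (-1) 0]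
        PySem.Str.join ", " ((starts.zip ends).map (fun r => pvPiece r.1 r.2 current_day))

-- ===== PRECONDITION & SPEC =====
def Spec_format_consecutive_days_py (days : List String) (current_day : Option Int) (out : String) : Prop := out = format_consecutive_days_py_alt days current_day
instance (days : List String) (current_day : Option Int) (out : String) : Decidable (Spec_format_consecutive_days_py days current_day out) := by unfold Spec_format_consecutive_days_py; infer_instance

-- ===== CLAIM (what is proved, stated in full; the proofs are below) =====
def Claim_equal_format_consecutive_days_py : Prop := ∀ (days : List String) (current_day : Option Int), Dom_format_consecutive_days_py days current_day → Spec_format_consecutive_days_py days current_day (format_consecutive_days_py days current_day)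

-- ===== LEMMAS AND PROOFS =====

-- the run decomposition both programs compute, as a direct recursion (proof device)
def pvRunsFrom (s e : Int) : List Int → List (Int × Int)
  | [] => [(s, e)]
  | d :: rest => if d = e + 1 then pvRunsFrom s d rest else (s, e) :: pvRunsFrom d d rest

-- end of the first run / remaining runs, independent of the recorded start
def pvRunEnd (e : Int) : List Int → Int
  | [] => e
  | d :: rest => if d = e + 1 then pvRunEnd d rest else e

def pvRunRest (e : Int) : List Int → List (Int × Int)
  | [] => []
  | d :: rest => if d = e + 1 then pvRunRest d rest else pvRunsFrom d d rest

lemma pvRunsFrom_eq (rest : List Int) : ∀ (e s : Int),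
    pvRunsFrom s e rest = (s, pvRunEnd e rest) :: pvRunRest e rest := by
  induction rest with
  | nil => intro e s; simp [pvRunsFrom, pvRunEnd, pvRunRest]
  | cons d rest ih =>
    intro e s
    simp only [pvRunsFrom, pvRunEnd, pvRunRest]
    by_cases hd : d = e + 1
    · simp only [if_pos hd, ih d s]
    · simp only [if_neg hd]

-- A's inline formatting expression equals B's _piece on a run (s ≤ e)
lemma pvPiece_eq (cd : Option Int) (s e : Int) (hse : s ≤ e) :
    (if (match cd with
         | some c => decide (c ≠ 0) && decide (s ≤ c) && decide (c ≤ e)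
         | none => false) then
       if s = e then "<u><b>" ++ PySem.Int.toStr s ++ "</b></u>"
       else if cd ≠ some s ∧ cd ≠ some e then PySem.Int.toStr s ++ "-" ++ PySem.Int.toStr e
       else if cd = some s then "<u><b>" ++ PySem.Int.toStr s ++ "</b></u>-" ++ PySem.Int.toStr e
       else PySem.Int.toStr s ++ "-<u><b>" ++ PySem.Int.toStr e ++ "</b></u>"
     else
       if s = e then PySem.Int.toStr s
       else PySem.Int.toStr s ++ "-" ++ PySem.Int.toStr e)
    = pvPiece s e cd := by
  cases cd with
  | none => simp [pvPiece]
  | some c =>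
    simp only [pvPiece]
    split_ifs <;> simp_all <;> omega

-- A's loop + tail block produce exactly the formatted runs
lemma pvMain (cd : Option Int) (tl : List Int) : ∀ (ranges : List String) (s e : Int), s ≤ e →
    (let st := tl.foldl (fun (acc : List String × Int × Int) day =>
        if day = acc.2.2 + 1 then (acc.1, acc.2.1, day)
        else
          (acc.1 ++
            [if (match cd with
                 | some c => decide (c ≠ 0) && decide (acc.2.1 ≤ c) && decide (c ≤ acc.2.2)
                 | none => false) then
               if acc.2.1 = acc.2.2 then "<u><b>" ++ PySem.Int.toStr acc.2.1 ++ "</b></u>"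
               else if cd ≠ some acc.2.1 ∧ cd ≠ some acc.2.2 then
                 PySem.Int.toStr acc.2.1 ++ "-" ++ PySem.Int.toStr acc.2.2
               else if cd = some acc.2.1 then
                 "<u><b>" ++ PySem.Int.toStr acc.2.1 ++ "</b></u>-" ++ PySem.Int.toStr acc.2.2
               else PySem.Int.toStr acc.2.1 ++ "-<u><b>" ++ PySem.Int.toStr acc.2.2 ++ "</b></u>"
             else
               if acc.2.1 = acc.2.2 then PySem.Int.toStr acc.2.1
               else PySem.Int.toStr acc.2.1 ++ "-" ++ PySem.Int.toStr acc.2.2],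
           day, day)) (ranges, s, e);
      st.1 ++
        [if (match cd with
             | some c => decide (c ≠ 0) && decide (st.2.1 ≤ c) && decide (c ≤ st.2.2)
             | none => false) then
           if st.2.1 = st.2.2 then "<u><b>" ++ PySem.Int.toStr st.2.1 ++ "</b></u>"
           else if cd ≠ some st.2.1 ∧ cd ≠ some st.2.2 then
             PySem.Int.toStr st.2.1 ++ "-" ++ PySem.Int.toStr st.2.2
           else if cd = some st.2.1 then
             "<u><b>" ++ PySem.Int.toStr st.2.1 ++ "</b></u>-" ++ PySem.Int.toStr st.2.2
           else PySem.Int.toStr st.2.1 ++ "-<u><b>" ++ PySem.Int.toStr st.2.2 ++ "</b></u>"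
         else
           if st.2.1 = st.2.2 then PySem.Int.toStr st.2.1
           else PySem.Int.toStr st.2.1 ++ "-" ++ PySem.Int.toStr st.2.2])
    = ranges ++ (pvRunsFrom s e tl).map (fun r => pvPiece r.1 r.2 cd) := by
  induction tl with
  | nil =>
    intro ranges s e hse
    simp only [List.foldl_nil, pvRunsFrom, List.map_cons, List.map_nil]
    exact congrArg (fun x => ranges ++ [x]) (pvPiece_eq cd s e hse)
  | cons d tl ih =>
    intro ranges s e hse
    simp only [List.foldl_cons, pvRunsFrom]
    by_cases hd : d = e + 1
    · simp only [if_pos hd]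
      have := ih ranges s d (by omega)
      simpa using this
    · simp only [if_neg hd, List.map_cons]
      rw [← pvPiece_eq cd s e hse]
      refine Eq.trans (ih _ d d le_rfl) ?_
      simp [List.append_assoc]

-- B's boundary-detection zip produces exactly the runs
lemma pvZipRuns (tl : List Int) : ∀ (s0 : Int),
    ((s0 :: (((s0 :: tl).zip tl).filter pvCut).map Prod.snd).zip
      ((((s0 :: tl).zip tl).filter pvCut).map Prod.fst ++ [PySem.List.pyGetD (s0 :: tl) (-1) 0]))
    = pvRunsFrom s0 s0 tl := by
  induction tl with
  | nil =>
    intro s0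
    simp [pvRunsFrom, PySem.List.pyGetD, PySem.List.pyGet?, PySem.List.pyIdx?]
  | cons d tl ih =>
    intro s0
    have hlast : PySem.List.pyGetD (s0 :: d :: tl) (-1) 0 = PySem.List.pyGetD (d :: tl) (-1) 0 := by
      simp [pysem]
    simp only [List.zip_cons_cons, hlast]
    by_cases hd : d = s0 + 1
    · have hcut : pvCut (s0, d) = false := by simp [pvCut, hd]
      simp only [List.filter_cons, hcut, Bool.false_eq_true, if_false]
      have ihd := ih d
      rw [pvRunsFrom_eq tl d d] at ihd
      cases hE : (((d :: tl).zip tl).filter pvCut).map Prod.fst ++ [PySem.List.pyGetD (d :: tl) (-1) 0] with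
      | nil => simp at hE
      | cons y ys =>
        rw [hE] at ihd
        rw [List.zip_cons_cons] at ihd
        have h1 : y = pvRunEnd d tl := by
          have := congrArg (fun l => List.head? l) ihd; simpa using this
        have h2 : (((((d :: tl).zip tl).filter pvCut).map Prod.snd).zip ys) = pvRunRest d tl := by
          have := congrArg (fun l => List.tail l) ihd; simpa using this
        show ((s0 :: _).zip (y :: ys)) = pvRunsFrom s0 s0 (d :: tl)
        rw [List.zip_cons_cons, h1, h2]
        have : pvRunsFrom s0 s0 (d :: tl) = pvRunsFrom s0 d tl := by
          simp [pvRunsFrom, hd]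
        rw [this, pvRunsFrom_eq tl d s0]
    · have hcut : pvCut (s0, d) = true := by simp [pvCut, hd]
      simp only [List.filter_cons, hcut, if_true, List.map_cons, List.cons_append,
        List.zip_cons_cons]
      rw [ih d]
      simp [pvRunsFrom, hd]

lemma pvParseInts_ne_nil {d : String} {ds : List String} {ints : List Int}
    (h : pvParseInts (d :: ds) = some ints) : ints ≠ [] := by
  intro hnil
  subst hnil
  simp [pvParseInts, List.mapM_cons, Option.bind_eq_some_iff] at h

-- ===== VERDICT (by name: the statement is the Claim_ definition above) =====
theorem format_consecutive_days_py_spec : Claim_equal_format_consecutive_days_py := by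
  intro days cd _
  unfold Spec_format_consecutive_days_py
  by_cases h : days = []
  · simp [format_consecutive_days_py, format_consecutive_days_py_alt, h]
  · cases hp : pvParseInts days with
    | none => simp [format_consecutive_days_py, format_consecutive_days_py_alt, if_neg h, hp]
    | some ints =>
      have hne : ints ≠ [] := by
        cases days with
        | nil => exact absurd rfl h
        | cons d ds => exact pvParseInts_ne_nil hp
      cases hs : PySem.List.sorted ints (fun x => x) false with
      | nil => exact absurd ((PySem.List.sorted_eq_nil_iff ints (fun x => x) false).mp hs) hne
      | cons s0 tl =>
        simp only [format_consecutive_days_py, format_consecutive_days_py_alt, if_neg h, hp, hs]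
        rw [PySem.List.slice_from_one]
        show _ = PySem.Str.join ", "
          (((s0 :: (((s0 :: tl).zip ((s0 :: tl).tail)).filter pvCut).map Prod.snd).zip
             ((((s0 :: tl).zip ((s0 :: tl).tail)).filter pvCut).map Prod.fst ++
               [PySem.List.pyGetD (s0 :: tl) (-1) 0])).map (fun r => pvPiece r.1 r.2 cd))
        rw [show (s0 :: tl).tail = tl from rfl, pvZipRuns tl s0]
        have := pvMain cd tl [] s0 s0 le_rfl
        simp only [List.nil_append] at this
        exact congrArg (PySem.Str.join ", ") this
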